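-- pv_equiv track=rewrite | github.com/oshosingh/Helper-Codes | comp.py | genAllLengthCombOfString
-- ===== SOURCE A (Python) =====
-- def genAllLengthCombOfString(strs):
--     contains = set()
--     visited = [False]*len(strs)
--
--     def dfs(curr):
--         contains.add(curr)
--         for i in range(len(strs)):
--             if(not visited[i]):
--                 visited[i] = True
--                 dfs(curr + strs[i])
--                 visited[i] = False    #backtrack
--     dfs("")
--     return len(contains)-1
-- ===== SOURCE B (Python) =====
-- def genAllLengthCombOfString(strs):
--     def perms(r, pool):
--         if r == 0:
--             return [[]]
--         return [[pool[i]] + rest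
--                 for i in range(len(pool))
--                 for rest in perms(r - 1, pool[:i] + pool[i + 1:])]
--     chars = list(strs)
--     seen = set()
--     for r in range(len(strs) + 1):
--         for p in perms(r, chars):
--             seen.add(''.join(p))
--     return len(seen) - 1
-- ===== Notes on version B (the rewrite author's own statement) =====
-- stated objective: alternative
-- what changed: Replaces the recursive DFS with a shared visited-array and backtracking by a direct enumeration: for each length r from 0 to len(strs), generate all r-permutations of the characters recursively by position, add each joined string to a set, and return its size minus one.
import Mathlib
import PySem

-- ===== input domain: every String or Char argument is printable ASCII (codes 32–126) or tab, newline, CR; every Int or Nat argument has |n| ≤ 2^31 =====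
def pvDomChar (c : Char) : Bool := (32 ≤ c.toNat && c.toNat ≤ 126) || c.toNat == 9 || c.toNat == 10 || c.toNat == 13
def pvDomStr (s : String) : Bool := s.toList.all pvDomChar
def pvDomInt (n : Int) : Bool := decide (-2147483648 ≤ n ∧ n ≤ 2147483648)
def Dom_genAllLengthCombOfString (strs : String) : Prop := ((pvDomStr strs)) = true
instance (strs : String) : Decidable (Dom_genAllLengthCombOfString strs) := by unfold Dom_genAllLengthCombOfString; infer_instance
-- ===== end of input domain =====

-- B replaces A's recursive DFS with a visited-array and backtracking by a direct
-- enumeration, for each length r, of all r-permutations of the characters (alternative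
-- decomposition, same exponential cost).

-- ===== PORT A =====
-- Termination measure helper for the DFS: setting a fresh index to True lowers the
-- number of False entries (cited by pvDfsALoop's decreasing_by).
theorem pvCountFalse_set_lt (bs : List Bool) (i : Nat) (h : bs.getD i true = false) :
    (bs.set i true).count false < bs.count false := by
  induction bs generalizing i with
  | nil => simp at h
  | cons b bs ih =>
    cases i with
    | zero =>
      simp only [List.getD_cons_zero] at h
      subst h
      simp
    | succ j =>
      simp only [List.getD_cons_succ] at h
      have := ih j h
      cases b <;> simp [List.set] <;> omega

-- Python's strs[i] / visited[i] are indexed only with i from range(len(strs)), always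
-- in range, so they are ported as List.getD (exact on every reached index).
mutual
def pvDfsA (strs curr : List Char) (visited : List Bool)
    (contains : PySem.Set String) : PySem.Set String :=
  pvDfsALoop strs curr visited (List.range strs.length)
    (PySem.Set.add contains (String.ofList curr))
termination_by (visited.count false, strs.length + 1)
decreasing_by
  apply Prod.Lex.right
  simp [List.length_range]

def pvDfsALoop (strs curr : List Char) (visited : List Bool) (is : List Nat)
    (contains : PySem.Set String) : PySem.Set String :=
  match is with
  | [] => contains
  | i :: rest =>
    if _h : visited.getD i true = false then
      pvDfsALoop strs curr visited rest
        (pvDfsA strs (curr ++ [strs.getD i ' ']) (visited.set i true) contains)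
    else
      pvDfsALoop strs curr visited rest contains
termination_by (visited.count false, is.length)
decreasing_by
  · exact Prod.Lex.left _ _ (pvCountFalse_set_lt _ _ _h)
  · apply Prod.Lex.right; simp only [List.length_cons]; omega
  · apply Prod.Lex.right; simp only [List.length_cons]; omega
end

def genAllLengthCombOfString (strs : String) : Int :=
  let cs := strs.toList
  let contains := pvDfsA cs [] (List.replicate cs.length false) PySem.Set.empty
  (PySem.Set.len contains) - 1

-- ===== PORT B =====
-- perms(r, pool): the r-permutations, picking each position in turn
-- (pool[:i] + pool[i+1:] is take i ++ drop (i+1); i ranges over range(len(pool)), in range).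
def pvPerms (r : Nat) (pool : List Char) : List (List Char) :=
  match r with
  | 0 => [[]]
  | r + 1 =>
    (List.range pool.length).flatMap (fun i =>
      (pvPerms r (pool.take i ++ pool.drop (i + 1))).map
        (fun rest => pool.getD i ' ' :: rest))

def genAllLengthCombOfString_alt (strs : String) : Int :=
  let chars := strs.toList
  let seen := (List.range (chars.length + 1)).foldl
    (fun seen r =>
      (pvPerms r chars).foldl (fun seen p => PySem.Set.add seen (String.ofList p)) seen)
    (PySem.Set.empty : PySem.Set String)
  (PySem.Set.len seen) - 1

-- ===== PRECONDITION & SPEC =====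
def Spec_genAllLengthCombOfString (strs : String) (out : Int) : Prop := out = genAllLengthCombOfString_alt strs
instance (strs : String) (out : Int) : Decidable (Spec_genAllLengthCombOfString strs out) := by unfold Spec_genAllLengthCombOfString; infer_instance

-- ===== CLAIM (what is proved, stated in full; the proofs are below) =====
def Claim_equal_genAllLengthCombOfString : Prop := ∀ (strs : String), Dom_genAllLengthCombOfString strs → Spec_genAllLengthCombOfString strs (genAllLengthCombOfString strs)

-- ===== LEMMAS AND PROOFS =====

-- `pvPicks cs bs p` : p is a string obtainable by picking, one after another, characters
-- of cs at distinct indices that are unvisited in bs.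
inductive pvPicks (cs : List Char) : List Bool → List Char → Prop
  | nil (bs : List Bool) : pvPicks cs bs []
  | cons {bs : List Bool} {i : Nat} {p : List Char} :
      bs.getD i true = false → pvPicks cs (bs.set i true) p →
      pvPicks cs bs (cs.getD i ' ' :: p)

-- characters of cs at unvisited indices, in order
def pvAvail : List Char → List Bool → List Char
  | [], _ => []
  | _ :: _, [] => []
  | c :: cs, b :: bs => if b then pvAvail cs bs else c :: pvAvail cs bs

theorem pvGetD_false_lt (bs : List Bool) (i : Nat) (h : bs.getD i true = false) :
    i < bs.length := by
  by_contra hge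
  rw [List.getD_eq_default _ _ (by omega)] at h
  simp at h

theorem pvAvail_perm (cs : List Char) (bs : List Bool) (i : Nat)
    (hlen : bs.length = cs.length) (h : bs.getD i true = false) :
    List.Perm (pvAvail cs bs) (cs.getD i ' ' :: pvAvail cs (bs.set i true)) := by
  induction cs generalizing bs i with
  | nil =>
    exact absurd (pvGetD_false_lt bs i h) (by simp only [List.length_nil] at hlen; omega)
  | cons c cs ih =>
    cases bs with
    | nil => simp at hlen
    | cons b bs =>
      cases i with
      | zero =>
        simp only [List.getD_cons_zero] at h
        subst h
        simp [pvAvail]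
      | succ j =>
        simp only [List.getD_cons_succ] at h
        have hl : bs.length = cs.length := by simpa using hlen
        have hperm := ih bs j hl h
        cases b with
        | true => simpa [pvAvail, List.set] using hperm
        | false =>
          simp only [pvAvail, List.set, if_neg Bool.false_ne_true, List.getD_cons_succ]
          exact (hperm.cons c).trans (List.Perm.swap _ _ _)

theorem pvMem_avail (cs : List Char) (bs : List Bool) (a : Char)
    (hlen : bs.length = cs.length) (h : a ∈ pvAvail cs bs) :
    ∃ i, bs.getD i true = false ∧ cs.getD i ' ' = a := by
  induction cs generalizing bs with
  | nil => simp [pvAvail] at h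
  | cons c cs ih =>
    cases bs with
    | nil => simp at hlen
    | cons b bs =>
      have hl : bs.length = cs.length := by simpa using hlen
      cases b with
      | true =>
        simp only [pvAvail, if_true] at h
        obtain ⟨i, h1, h2⟩ := ih bs hl h
        exact ⟨i + 1, by simpa using h1, by simpa using h2⟩
      | false =>
        simp only [pvAvail, if_neg Bool.false_ne_true, List.mem_cons] at h
        rcases h with h | h
        · exact ⟨0, by simp, by simp [h]⟩
        · obtain ⟨i, h1, h2⟩ := ih bs hl h
          exact ⟨i + 1, by simpa using h1, by simpa using h2⟩

theorem pvPicks_iff_subperm (cs : List Char) (bs : List Bool) (p : List Char)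
    (hlen : bs.length = cs.length) :
    pvPicks cs bs p ↔ List.Subperm p (pvAvail cs bs) := by
  constructor
  · intro h
    induction h with
    | nil => exact List.nil_subperm
    | @cons bs i p hi _ ih =>
      have hlen' : (bs.set i true).length = cs.length := by simpa using hlen
      have hsub := ih hlen'
      have h1 : List.Subperm (cs.getD i ' ' :: p) (cs.getD i ' ' :: pvAvail cs (bs.set i true)) :=
        (List.subperm_cons _).mpr hsub
      exact ((pvAvail_perm cs bs i hlen hi).subperm_left).mpr h1
  · intro h
    induction p generalizing bs with
    | nil => exact pvPicks.nil bs
    | cons a q ih =>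
      have ha : a ∈ pvAvail cs bs := h.subset (List.mem_cons_self)
      obtain ⟨i, hi, hci⟩ := pvMem_avail cs bs a hlen ha
      have hperm := pvAvail_perm cs bs i hlen hi
      rw [hci] at hperm
      have h2 : List.Subperm (a :: q) (a :: pvAvail cs (bs.set i true)) :=
        hperm.subperm_left.mp h
      have hq := (List.subperm_cons a).mp h2
      have := ih (bs.set i true) (by simpa using hlen) hq
      subst hci
      exact pvPicks.cons hi this

theorem pvAvail_replicate (cs : List Char) :
    pvAvail cs (List.replicate cs.length false) = cs := by
  induction cs with
  | nil => rfl
  | cons c cs ih => simp [pvAvail, List.replicate, ih]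

-- membership in pvPerms r pool ↔ length-r subpermutation
theorem pvMem_perms (r : Nat) (pool p : List Char) :
    p ∈ pvPerms r pool ↔ p.length = r ∧ List.Subperm p pool := by
  induction r generalizing pool p with
  | zero =>
    simp only [pvPerms, List.mem_singleton]
    constructor
    · rintro rfl; exact ⟨rfl, List.nil_subperm⟩
    · rintro ⟨h, -⟩; exact List.length_eq_zero_iff.mp h
  | succ r ih =>
    simp only [pvPerms, List.mem_flatMap, List.mem_map, List.mem_range]
    constructor
    · rintro ⟨i, hi, q, hq, rfl⟩
      obtain ⟨hlen, hsub⟩ := (ih _ q).mp hq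
      refine ⟨by simp [hlen], ?_⟩
      have hsplit : pool = pool.take i ++ pool.getD i ' ' :: pool.drop (i + 1) := by
        conv_lhs => rw [← List.take_append_drop i pool]
        congr 1
        rw [List.getD_eq_getElem pool ' ' hi]
        exact List.drop_eq_getElem_cons hi
      have hperm : List.Perm pool (pool.getD i ' ' :: (pool.take i ++ pool.drop (i + 1))) := by
        conv_lhs => rw [hsplit]
        exact List.perm_middle
      have h1 : List.Subperm (pool.getD i ' ' :: q)
          (pool.getD i ' ' :: (pool.take i ++ pool.drop (i + 1))) :=
        (List.subperm_cons _).mpr hsub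
      exact hperm.subperm_left.mpr h1
    · rintro ⟨hlen, hsub⟩
      cases p with
      | nil => simp at hlen
      | cons a q =>
        have ha : a ∈ pool := hsub.subset List.mem_cons_self
        have hi : pool.idxOf a < pool.length := List.idxOf_lt_length_of_mem ha
        refine ⟨pool.idxOf a, hi, q, ?_, ?_⟩
        · rw [ih]
          refine ⟨by simpa using hlen, ?_⟩
          have herase : pool.erase a = pool.take (pool.idxOf a) ++ pool.drop (pool.idxOf a + 1) := by
            rw [List.erase_eq_eraseIdx_of_idxOf rfl, List.eraseIdx_eq_take_drop_succ]
          have hperm : List.Perm pool (a :: pool.erase a) := List.perm_cons_erase ha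
          have h2 := hperm.subperm_left.mp hsub
          have hq := (List.subperm_cons a).mp h2
          rwa [herase] at hq
        · rw [List.getD_eq_getElem pool ' ' hi, List.getElem_idxOf]

-- membership characterisation of the DFS (loop part), given the induction hypothesis
-- for the recursive pvDfsA calls at strictly fewer unvisited indices
theorem pvDfsALoop_mem (strs curr : List Char) (visited : List Bool)
    (IH : ∀ curr' (visited' : List Bool) acc,
        visited'.count false < visited.count false → visited'.length = strs.length →
        ∀ s, s ∈ pvDfsA strs curr' visited' acc ↔
          s ∈ acc ∨ ∃ p, pvPicks strs visited' p ∧ s = String.ofList (curr' ++ p))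
    (hlen : visited.length = strs.length) :
    ∀ (is : List Nat) acc s, s ∈ pvDfsALoop strs curr visited is acc ↔
      s ∈ acc ∨ ∃ i ∈ is, visited.getD i true = false ∧
        ∃ p, pvPicks strs (visited.set i true) p ∧
          s = String.ofList (curr ++ strs.getD i ' ' :: p) := by
  intro is
  induction is with
  | nil => intro acc s; simp [pvDfsALoop]
  | cons i rest ihis =>
    intro acc s
    rw [pvDfsALoop]
    by_cases h : visited.getD i true = false
    · rw [dif_pos h, ihis]
      have hcnt := pvCountFalse_set_lt visited i h
      have hlen' : (visited.set i true).length = strs.length := by simpa using hlen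
      rw [IH _ _ _ hcnt hlen']
      constructor
      · rintro ((hs | ⟨p, hp, rfl⟩) | ⟨j, hj, hjf, p, hp, rfl⟩)
        · exact Or.inl hs
        · exact Or.inr ⟨i, List.mem_cons_self, h, p, hp, by simp⟩
        · exact Or.inr ⟨j, List.mem_cons_of_mem _ hj, hjf, p, hp, rfl⟩
      · rintro (hs | ⟨j, hj, hjf, p, hp, rfl⟩)
        · exact Or.inl (Or.inl hs)
        · rcases List.mem_cons.mp hj with rfl | hj
          · exact Or.inl (Or.inr ⟨p, hp, by simp⟩)
          · exact Or.inr ⟨j, hj, hjf, p, hp, rfl⟩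
    · rw [dif_neg h, ihis]
      constructor
      · rintro (hs | ⟨j, hj, hjf, rest'⟩)
        · exact Or.inl hs
        · exact Or.inr ⟨j, List.mem_cons_of_mem _ hj, hjf, rest'⟩
      · rintro (hs | ⟨j, hj, hjf, rest'⟩)
        · exact Or.inl hs
        · rcases List.mem_cons.mp hj with rfl | hj
          · exact absurd hjf h
          · exact Or.inr ⟨j, hj, hjf, rest'⟩

theorem pvDfsA_mem (strs : List Char) :
    ∀ (n : Nat) (curr : List Char) (visited : List Bool) acc,
      visited.count false = n → visited.length = strs.length →
      ∀ s, s ∈ pvDfsA strs curr visited acc ↔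
        s ∈ acc ∨ ∃ p, pvPicks strs visited p ∧ s = String.ofList (curr ++ p) := by
  intro n
  induction n using Nat.strong_induction_on with
  | _ n IHn =>
    intro curr visited acc hcnt hlen s
    rw [pvDfsA]
    have IH : ∀ curr' (visited' : List Bool) acc',
        visited'.count false < visited.count false → visited'.length = strs.length →
        ∀ s, s ∈ pvDfsA strs curr' visited' acc' ↔
          s ∈ acc' ∨ ∃ p, pvPicks strs visited' p ∧ s = String.ofList (curr' ++ p) := by
      intro curr' visited' acc' hlt hlen' s'
      exact IHn _ (hcnt ▸ hlt) curr' visited' acc' rfl hlen' s'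
    rw [pvDfsALoop_mem strs curr visited IH hlen]
    rw [PySem.Set.mem_add]
    constructor
    · rintro ((hs | rfl) | ⟨i, _, hif, p, hp, rfl⟩)
      · exact Or.inl hs
      · exact Or.inr ⟨[], pvPicks.nil visited, by simp⟩
      · exact Or.inr ⟨strs.getD i ' ' :: p, pvPicks.cons hif hp, rfl⟩
    · rintro (hs | ⟨p, hp, rfl⟩)
      · exact Or.inl (Or.inl hs)
      · cases hp with
        | nil => exact Or.inl (Or.inr (by simp))
        | @cons bs i p hif hp =>
          have hilt : i < strs.length := hlen ▸ pvGetD_false_lt visited i hif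
          exact Or.inr ⟨i, List.mem_range.mpr hilt, hif, p, hp, rfl⟩

-- Nodup invariants
theorem pvDfsALoop_nodup (strs curr : List Char) (visited : List Bool)
    (IH : ∀ curr' (visited' : List Bool) acc, visited'.count false < visited.count false →
        List.Nodup acc → List.Nodup (pvDfsA strs curr' visited' acc)) :
    ∀ (is : List Nat) acc, List.Nodup acc → List.Nodup (pvDfsALoop strs curr visited is acc) := by
  intro is
  induction is with
  | nil => intro acc h; rw [pvDfsALoop]; exact h
  | cons i rest ihis =>
    intro acc h
    rw [pvDfsALoop]
    by_cases hv : visited.getD i true = false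
    · rw [dif_pos hv]
      exact ihis _ (IH _ _ _ (pvCountFalse_set_lt _ _ hv) h)
    · rw [dif_neg hv]
      exact ihis _ h

theorem pvDfsA_nodup (strs : List Char) :
    ∀ (n : Nat) (curr : List Char) (visited : List Bool) acc,
      visited.count false = n → List.Nodup acc → List.Nodup (pvDfsA strs curr visited acc) := by
  intro n
  induction n using Nat.strong_induction_on with
  | _ n IHn =>
    intro curr visited acc hcnt hacc
    rw [pvDfsA]
    exact pvDfsALoop_nodup strs curr visited
      (fun c' v' a' hlt ha => IHn _ (hcnt ▸ hlt) c' v' a' rfl ha) _ _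
      (PySem.Set.nodup_add acc _ hacc)

theorem pvFoldlAdd_nodup (l : List (List Char)) (s : PySem.Set String) (h : List.Nodup s) :
    List.Nodup (l.foldl (fun s p => PySem.Set.add s (String.ofList p)) s) := by
  induction l generalizing s with
  | nil => exact h
  | cons p l ih => exact ih _ (PySem.Set.nodup_add s _ h)

theorem pvBFold_mem (chars : List Char) (rs : List Nat) (seen : PySem.Set String) (s : String) :
    s ∈ rs.foldl (fun seen r =>
        (pvPerms r chars).foldl (fun seen p => PySem.Set.add seen (String.ofList p)) seen) seen ↔
      s ∈ seen ∨ ∃ r ∈ rs, ∃ p ∈ pvPerms r chars, s = String.ofList p := by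
  induction rs generalizing seen with
  | nil => simp
  | cons r rs ih =>
    simp only [List.foldl_cons, ih, PySem.Set.mem_foldl_add, List.mem_cons]
    constructor
    · rintro ((hs | ⟨p, hp, rfl⟩) | ⟨r', hr', p, hp, rfl⟩)
      · exact Or.inl hs
      · exact Or.inr ⟨r, Or.inl rfl, p, hp, rfl⟩
      · exact Or.inr ⟨r', Or.inr hr', p, hp, rfl⟩
    · rintro (hs | ⟨r', hr' | hr', p, hp, rfl⟩)
      · exact Or.inl (Or.inl hs)
      · subst hr'; exact Or.inl (Or.inr ⟨p, hp, rfl⟩)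
      · exact Or.inr ⟨r', hr', p, hp, rfl⟩

theorem pvBFold_nodup (chars : List Char) (rs : List Nat) (seen : PySem.Set String)
    (h : List.Nodup seen) :
    List.Nodup (rs.foldl (fun seen r =>
      (pvPerms r chars).foldl (fun seen p => PySem.Set.add seen (String.ofList p)) seen) seen) := by
  induction rs generalizing seen with
  | nil => exact h
  | cons r rs ih => exact ih _ (pvFoldlAdd_nodup _ _ h)

theorem pvSets_length (cs : List Char) :
    (pvDfsA cs [] (List.replicate cs.length false) PySem.Set.empty).length =
    ((List.range (cs.length + 1)).foldl
      (fun seen r => (pvPerms r cs).foldl (fun seen p => PySem.Set.add seen (String.ofList p)) seen)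
      (PySem.Set.empty : PySem.Set String)).length := by
  have hAnd : List.Nodup (pvDfsA cs [] (List.replicate cs.length false) PySem.Set.empty) :=
    pvDfsA_nodup cs _ [] _ PySem.Set.empty rfl List.nodup_nil
  have hBnd := pvBFold_nodup cs (List.range (cs.length + 1)) PySem.Set.empty List.nodup_nil
  refine ((List.perm_ext_iff_of_nodup hAnd hBnd).mpr ?_).length_eq
  intro s
  rw [pvDfsA_mem cs _ [] _ PySem.Set.empty rfl (by simp) s, pvBFold_mem]
  constructor
  · rintro (hs | ⟨p, hp, rfl⟩)
    · exact absurd hs (List.not_mem_nil)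
    · have hsub : List.Subperm p cs := by
        have := (pvPicks_iff_subperm cs _ p (by simp)).mp hp
        rwa [pvAvail_replicate] at this
      refine Or.inr ⟨p.length, List.mem_range.mpr (by have := hsub.length_le; omega), p, ?_, by simp⟩
      exact (pvMem_perms p.length cs p).mpr ⟨rfl, hsub⟩
  · rintro (hs | ⟨r, _, p, hp, rfl⟩)
    · exact absurd hs (List.not_mem_nil)
    · obtain ⟨-, hsub⟩ := (pvMem_perms r cs p).mp hp
      refine Or.inr ⟨p, ?_, by simp⟩
      rw [pvPicks_iff_subperm cs _ p (by simp), pvAvail_replicate]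
      exact hsub

-- ===== VERDICT (by name: the statement is the Claim_ definition above) =====
theorem genAllLengthCombOfString_spec : Claim_equal_genAllLengthCombOfString := by
  intro strs _
  unfold Spec_genAllLengthCombOfString genAllLengthCombOfString genAllLengthCombOfString_alt
  exact congrArg (fun n : Nat => (n : Int) - 1) (pvSets_length strs.toList)
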